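-- pv_equiv track=rewrite | github.com/huaanth/FollowUp | insta.py | doesnt_followback
-- ===== SOURCE A (Python) =====
-- def doesnt_followback(followers, following):
--     followers.sort()
--     following.sort()
--     fake = []
--     for i in range(len(following)):
--         try:
--             followers.index(following[i])
--         except ValueError:
--             fake += [following[i]]
--     return fake
-- ===== SOURCE B (Python) =====
-- def doesnt_followback(followers, following):
--     followers.sort()
--     following.sort()
--     fake = []
--     j = 0
--     n = len(followers)
--     for x in following:
--         while j < n and followers[j] < x:
--             j += 1
--         if not (j < n and followers[j] == x):
--             fake.append(x)
--     return fake
-- ===== Notes on version B (the rewrite author's own statement) =====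
-- stated objective: faster
-- what changed: Replaces the per-element linear followers.index scan with a single two-pointer merge over the two sorted lists, testing each following element against the advancing followers pointer.
import Mathlib
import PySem

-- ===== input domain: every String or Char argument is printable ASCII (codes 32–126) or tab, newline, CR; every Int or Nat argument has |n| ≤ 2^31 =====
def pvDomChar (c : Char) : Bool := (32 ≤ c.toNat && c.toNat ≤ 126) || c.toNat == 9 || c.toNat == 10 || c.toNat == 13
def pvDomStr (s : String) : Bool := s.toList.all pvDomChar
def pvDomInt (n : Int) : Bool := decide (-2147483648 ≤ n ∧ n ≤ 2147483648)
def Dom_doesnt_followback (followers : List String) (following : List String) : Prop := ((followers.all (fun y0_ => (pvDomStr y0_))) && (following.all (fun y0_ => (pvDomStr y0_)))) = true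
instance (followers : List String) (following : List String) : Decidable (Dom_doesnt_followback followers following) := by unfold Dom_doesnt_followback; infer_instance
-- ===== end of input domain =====

-- B replaces A's per-element followers.index scan by a single two-pointer merge of the
-- two sorted lists (objective: faster). Both Pythons sort `followers` and `following`
-- IN PLACE (the caller observes that mutation identically); the equivalence proved here
-- is about the RETURN value.

-- ===== PORT A =====
def doesnt_followback (followers : List String) (following : List String) : List String :=
  let fs := PySem.List.sorted followers (fun x => x) false   -- followers.sort()
  let gs := PySem.List.sorted following (fun x => x) false   -- following.sort()
  -- for i in range(len(following)): try followers.index(following[i]) except ValueError: fake += [following[i]]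
  (PySem.List.pyRange 0 (gs.length : Int) 1).foldl
    (fun fake i =>
      if (PySem.List.index? fs (PySem.List.pyGetD gs i "")).isSome then fake
      else fake ++ [PySem.List.pyGetD gs i ""]) []

-- ===== PORT B =====
-- the two-pointer loop of Source B: for x in following, advance the followers pointer
-- past elements < x (here: dropWhile on the remaining suffix), then test the front
def dfbMerge : List String → List String → List String
  | _, [] => []
  | fs, g :: gs =>
    let fs' := fs.dropWhile (fun a => decide (a < g))
    if fs'.head? == some g then dfbMerge fs' gs else g :: dfbMerge fs' gs

def doesnt_followback_alt (followers : List String) (following : List String) : List String :=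
  dfbMerge (PySem.List.sorted followers (fun x => x) false)
           (PySem.List.sorted following (fun x => x) false)

-- ===== PRECONDITION & SPEC =====
def Spec_doesnt_followback (followers : List String) (following : List String) (out : List String) : Prop := out = doesnt_followback_alt followers following
instance (followers : List String) (following : List String) (out : List String) : Decidable (Spec_doesnt_followback followers following out) := by unfold Spec_doesnt_followback; infer_instance

-- ===== CLAIM (what is proved, stated in full; the proofs are below) =====
def Claim_equal_doesnt_followback : Prop := ∀ (followers : List String) (following : List String), Dom_doesnt_followback followers following → Spec_doesnt_followback followers following (doesnt_followback followers following)

-- ===== LEMMAS AND PROOFS =====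

-- elements dropped by `dropWhile (· < g)` are < g, so membership of any y with ¬ y < g is unaffected
lemma mem_dropWhile_lt (g y : String) (h : ¬ y < g) :
    ∀ fs : List String, (y ∈ fs.dropWhile (fun a => decide (a < g))) ↔ y ∈ fs := by
  intro fs
  induction fs with
  | nil => simp
  | cons f t ih =>
    by_cases hf : f < g
    · rw [List.dropWhile_cons_of_pos (by simpa using hf), ih]
      have hne : y ≠ f := fun hyf => h (hyf ▸ hf)
      simp [List.mem_cons, hne]
    · rw [List.dropWhile_cons_of_neg (by simpa using hf)]

-- the two-pointer merge on sorted lists computes "following filtered by not-a-follower"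
lemma dfbMerge_eq_filter :
    ∀ (gs fs : List String), fs.Pairwise (· ≤ ·) → gs.Pairwise (· ≤ ·) →
      dfbMerge fs gs = gs.filter (fun y => !(decide (y ∈ fs))) := by
  intro gs
  induction gs with
  | nil => intro fs _ _; simp [dfbMerge]
  | cons g gs ih =>
    intro fs hfs hgs
    have hgle : ∀ y ∈ gs, g ≤ y := fun y hy => (List.pairwise_cons.mp hgs).1 y hy
    have hgs' : gs.Pairwise (· ≤ ·) := (List.pairwise_cons.mp hgs).2
    set fs' := fs.dropWhile (fun a => decide (a < g)) with hfs'
    have hfs'pw : fs'.Pairwise (· ≤ ·) := hfs.sublist (List.dropWhile_sublist _)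
    -- the filtered tail is the same whether tested against fs or fs'
    have htail : gs.filter (fun y => !(decide (y ∈ fs'))) = gs.filter (fun y => !(decide (y ∈ fs))) := by
      apply List.filter_congr
      intro y hy
      have : (y ∈ fs') ↔ y ∈ fs :=
        mem_dropWhile_lt g y (not_lt.mpr (hgle y hy)) fs
      simp [this]
    have hrec : dfbMerge fs' gs = gs.filter (fun y => !(decide (y ∈ fs))) := by
      rw [ih fs' hfs'pw hgs', htail]
    have hmemg : (g ∈ fs') ↔ g ∈ fs := mem_dropWhile_lt g g (lt_irrefl g) fs
    show (if fs'.head? == some g then dfbMerge fs' gs else g :: dfbMerge fs' gs)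
        = List.filter (fun y => !(decide (y ∈ fs))) (g :: gs)
    rcases hh : fs' with _ | ⟨f, t⟩
    · -- exhausted followers: g is not a follower
      have hgnot : g ∉ fs := by rw [← hmemg, hh]; simp
      rw [hh] at hrec
      simp [hrec, hgnot]
    · rw [hh] at hrec
      by_cases hfg : f = g
      · -- front matches: g is a follower
        have hgmem : g ∈ fs := hmemg.mp (by rw [hh, hfg]; exact List.mem_cons_self)
        subst hfg
        simp [hrec, hgmem]
      · -- front ≠ g: since ¬ f < g and fs' is sorted, g is nowhere in fs'
        have hw : fs.dropWhile (fun a => decide (a < g)) ≠ [] := by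
          rw [← hfs', hh]; simp
        have hq : (fs.dropWhile (fun a => decide (a < g))).head? = some f := by
          rw [← hfs', hh]; rfl
        have hstep := List.head_dropWhile_not (fun a => decide (a < g)) hw
        have hhd := List.head?_eq_some_head (l := fs.dropWhile (fun a => decide (a < g))) hw
        rw [hq] at hhd
        rw [← Option.some.inj hhd] at hstep
        have hfnotlt : ¬ f < g := by simpa using hstep
        have hglt : g < f := lt_of_le_of_ne (not_lt.mp hfnotlt) (Ne.symm hfg)
        have hgnot' : g ∉ fs' := by
          rw [hh]
          intro hmem
          rcases List.mem_cons.mp hmem with h1 | h2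
          · exact hfg h1.symm
          · have hle : f ≤ g := by
              rw [hh] at hfs'pw
              exact (List.pairwise_cons.mp hfs'pw).1 g h2
            exact absurd (lt_of_lt_of_le hglt hle) (lt_irrefl g)
        have hgnot : g ∉ fs := fun hm => hgnot' (hmemg.mpr hm)
        simp [hrec, hgnot, hfg]

-- A's accumulator loop is "append the non-members", i.e. the same filter
lemma foldl_notmem_filter (fs : List String) :
    ∀ (gs acc : List String),
      gs.foldl (fun fake g => if (PySem.List.index? fs g).isSome then fake else fake ++ [g]) acc
        = acc ++ gs.filter (fun y => !(decide (y ∈ fs))) := by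
  intro gs
  induction gs with
  | nil => intro acc; simp
  | cons g gs ih =>
    intro acc
    by_cases hg : g ∈ fs
    · have hc : (PySem.List.index? fs g).isSome = true := by simp [hg]
      simp only [List.foldl_cons, hc, if_true]
      rw [ih]
      simp [hg]
    · have hc : (PySem.List.index? fs g).isSome = false := by simp [hg]
      simp only [List.foldl_cons, hc, Bool.false_eq_true, if_false]
      rw [ih]
      simp [hg]

-- ===== VERDICT (by name: the statement is the Claim_ definition above) =====
theorem doesnt_followback_spec : Claim_equal_doesnt_followback := by
  intro followers following _
  show doesnt_followback followers following = doesnt_followback_alt followers following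
  have h1 : doesnt_followback followers following
      = (PySem.List.pyRange 0 ((PySem.List.sorted following (fun x => x) false).length : Int) 1).foldl
          (fun fake i =>
            if (PySem.List.index? (PySem.List.sorted followers (fun x => x) false)
                  (PySem.List.pyGetD (PySem.List.sorted following (fun x => x) false) i "")).isSome then fake
            else fake ++ [PySem.List.pyGetD (PySem.List.sorted following (fun x => x) false) i ""]) [] := rfl
  rw [h1,
    PySem.List.foldl_pyRange_zero_pyGetD' (PySem.List.sorted following (fun x => x) false) ""
      (fun fake g =>
        if (PySem.List.index? (PySem.List.sorted followers (fun x => x) false) g).isSome then fake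
        else fake ++ [g]) [],
    foldl_notmem_filter,
    doesnt_followback_alt,
    dfbMerge_eq_filter _ _
      (PySem.List.sorted_pairwise followers (fun x => x))
      (PySem.List.sorted_pairwise following (fun x => x))]
  simp
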